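-- pv_equiv track=rewrite | github.com/piy1994/Data-Mining | Trees/pre_proc.py | fnc_two
-- ===== SOURCE A (Python) =====
-- def fnc_two(lst):
--     dic = {}
--     for word in lst:
--         if word in dic:
--             dic[word] = 2
--         else:
--             dic[word] = 1
--     return dic
-- ===== SOURCE B (Python) =====
-- def fnc_two(lst):
--     # dedup-then-count: distinct keys in first-occurrence order, then a full
--     # count scan per key, thresholded to 1/2. No running dict state is kept.
--     return {w: (1 if lst.count(w) == 1 else 2) for w in dict.fromkeys(lst)}
-- ===== Notes on version B (the rewrite author's own statement) =====
-- stated objective: alternative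
-- what changed: Replaces A's single online pass (membership test writing 1 or capping at 2 in a growing dict) with a dedup-then-count algorithm: first extract the distinct keys in first-occurrence order, then for each key run a full count scan over the list and threshold it to 1 or 2; no incremental dict state exists.
import Mathlib
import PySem

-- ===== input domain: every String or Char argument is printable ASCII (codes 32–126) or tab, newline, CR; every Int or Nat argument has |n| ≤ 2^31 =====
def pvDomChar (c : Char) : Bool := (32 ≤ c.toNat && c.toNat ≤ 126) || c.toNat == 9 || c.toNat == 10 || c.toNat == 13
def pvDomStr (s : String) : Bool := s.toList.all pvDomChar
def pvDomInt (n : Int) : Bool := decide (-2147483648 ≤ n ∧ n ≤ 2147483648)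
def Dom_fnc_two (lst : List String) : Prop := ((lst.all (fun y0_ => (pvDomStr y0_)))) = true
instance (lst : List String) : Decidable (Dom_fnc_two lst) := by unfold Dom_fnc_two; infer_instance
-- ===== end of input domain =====

-- B replaces A's single online pass (membership test writing 1 or capping at 2 in a
-- growing dict) by a dedup-then-count algorithm: distinct keys in first-occurrence
-- order, then a full count scan per key thresholded to 1/2 (alternative, not faster).


-- ===== PORT A =====
-- dic = {}; for word in lst: dic[word] = 2 if word in dic else 1; return dic
def fnc_two (lst : List String) : List (String × Int) :=
  (lst.foldl (fun d w => if d.contains w then d.insert w 2 else d.insert w 1)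
    (PySem.Dict.empty : PySem.Dict String Int)).items

-- ===== PORT B =====
-- {w: 1 if lst.count(w) == 1 else 2 for w in dict.fromkeys(lst)}:
-- dict.fromkeys(lst) iterated = PySem.List.dedup lst (first occurrences, in order);
-- the comprehension's keys are distinct, so the resulting dict's items are exactly
-- this map over the deduped keys (exact: fresh distinct keys append in order).
def fnc_two_alt (lst : List String) : List (String × Int) :=
  (PySem.List.dedup lst).map (fun w => (w, if lst.count w == 1 then (1 : Int) else 2))

-- ===== PRECONDITION & SPEC =====
def Spec_fnc_two (lst : List String) (out : List (String × Int)) : Prop := out = fnc_two_alt lst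
instance (lst : List String) (out : List (String × Int)) : Decidable (Spec_fnc_two lst out) := by unfold Spec_fnc_two; infer_instance

-- ===== CLAIM (what is proved, stated in full; the proofs are below) =====
def Claim_equal_fnc_two : Prop := ∀ (lst : List String), Dom_fnc_two lst → Spec_fnc_two lst (fnc_two lst)

-- ===== LEMMAS AND PROOFS =====

-- the threshold map applied to a counter entry
def pvThresh (p : String × Int) : String × Int := (p.1, if p.2 == 1 then (1 : Int) else 2)

theorem pvContains_map_thresh (c : PySem.Dict String Int) (w : String) :
    (PySem.Dict.mk (c.items.map pvThresh)).contains w = c.contains w := by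
  unfold PySem.Dict.contains pvThresh
  simp [List.any_map, Function.comp_def]

theorem pvGetD_nonneg_insert (c : PySem.Dict String Int) (w : String)
    (h : ∀ k, c.contains k = true → 1 ≤ c.getD k 0) :
    ∀ k, (c.insert w (c.getD w 0 + 1)).contains k = true →
      1 ≤ (c.insert w (c.getD w 0 + 1)).getD k 0 := by
  intro k hk
  by_cases hkw : k = w
  · subst hkw
    rw [PySem.Dict.getD_insert_self]
    by_cases hc : c.contains k = true
    · have := h k hc; omega
    · rw [PySem.Dict.getD_of_not_contains c 0 (by simpa using hc)]
      omega
  · rw [PySem.Dict.getD_insert_of_ne c _ _ hkw]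
    apply h
    rw [PySem.Dict.contains_insert] at hk
    simpa [hkw] using hk

-- main invariant: A's fold from the thresholded dict equals the thresholded counter fold
theorem pvMain (lst : List String) :
    ∀ (c : PySem.Dict String Int), (∀ k, c.contains k = true → 1 ≤ c.getD k 0) →
    lst.foldl (fun d w => if d.contains w then d.insert w 2 else d.insert w 1)
        (PySem.Dict.mk (c.items.map pvThresh))
      = PySem.Dict.mk
          ((lst.foldl (fun d w => d.insert w (d.getD w 0 + 1)) c).items.map pvThresh) := by
  induction lst with
  | nil => intro c _; rfl
  | cons w t ih =>
    intro c hpos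
    simp only [List.foldl_cons]
    have hstep :
        (if (PySem.Dict.mk (c.items.map pvThresh)).contains w then
            (PySem.Dict.mk (c.items.map pvThresh)).insert w 2
          else (PySem.Dict.mk (c.items.map pvThresh)).insert w 1)
        = PySem.Dict.mk ((c.insert w (c.getD w 0 + 1)).items.map pvThresh) := by
      by_cases hc : c.contains w = true
      · have h1 : 1 ≤ c.getD w 0 := hpos w hc
        have hcm : (PySem.Dict.mk (c.items.map pvThresh)).contains w = true := by
          rw [pvContains_map_thresh]; exact hc
        rw [if_pos hcm]
        rw [PySem.Dict.items_insert_of_contains _ _ hc]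
        unfold PySem.Dict.insert
        rw [if_pos hcm]
        simp only [List.map_map]
        congr 1
        apply List.map_congr_left
        intro p _
        by_cases hpw : p.1 = w <;>
          simp_all [pvThresh, Function.comp, show ¬ (c.getD w 0 + 1 = 1) by omega]
      · have hc' : c.contains w = false := by simpa using hc
        have hcm : (PySem.Dict.mk (c.items.map pvThresh)).contains w = false := by
          rw [pvContains_map_thresh]; exact hc'
        rw [if_neg (by simp [hcm])]
        rw [PySem.Dict.items_insert_of_not_contains _ _ hc',
          PySem.Dict.getD_of_not_contains c 0 hc']
        unfold PySem.Dict.insert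
        rw [if_neg (by simp [hcm])]
        simp [pvThresh]
    rw [hstep]
    exact ih _ (pvGetD_nonneg_insert c w hpos)

-- ===== VERDICT (by name: the statement is the Claim_ definition above) =====
theorem fnc_two_spec : Claim_equal_fnc_two := by
  intro lst _
  unfold Spec_fnc_two fnc_two fnc_two_alt
  have h := pvMain lst PySem.Dict.empty
    (by intro k hk; simp [PySem.Dict.contains, PySem.Dict.empty] at hk)
  have he : (PySem.Dict.mk (((PySem.Dict.empty : PySem.Dict String Int)).items.map pvThresh))
      = (PySem.Dict.empty : PySem.Dict String Int) := rfl
  rw [he] at h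
  rw [h]
  rw [PySem.Dict.foldl_insert_getD_add_one_eq_counter, PySem.Dict.items_counter]
  simp [pvThresh, PySem.List.dedup_eq_ofList]
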